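-- pv_equiv track=rewrite | github.com/drawnator/olimpiadas_2022 | SBC/questões/a.py | solve
-- ===== SOURCE A (Python) =====
-- def solve(l):
--     count = 0
--     l1 = 0
--     for i in l:
--         if i == "a":
--             l1 = l1 + 1
--         else:
--             if l1 > 1:
--                 count = count + l1
--             l1 = 0
--     if l1 > 1:
--         count = count + l1
--     return count
-- ===== SOURCE B (Python) =====
-- def solve(l):
--     l = list(l)
--     n = len(l)
--     return sum(1 for i, x in enumerate(l)
--                if x == "a" and ((i > 0 and l[i - 1] == "a")
--                                or (i + 1 < n and l[i + 1] == "a")))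
-- ===== Notes on version B (the rewrite author's own statement) =====
-- stated objective: simpler
-- what changed: Replaces A's run-length counter/reset state machine with a single comprehension counting the 'a' elements that have an 'a' neighbour (an 'a' belongs to a run of length >1 iff it is adjacent to another 'a'), so no run state is maintained at all.
import Mathlib
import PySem

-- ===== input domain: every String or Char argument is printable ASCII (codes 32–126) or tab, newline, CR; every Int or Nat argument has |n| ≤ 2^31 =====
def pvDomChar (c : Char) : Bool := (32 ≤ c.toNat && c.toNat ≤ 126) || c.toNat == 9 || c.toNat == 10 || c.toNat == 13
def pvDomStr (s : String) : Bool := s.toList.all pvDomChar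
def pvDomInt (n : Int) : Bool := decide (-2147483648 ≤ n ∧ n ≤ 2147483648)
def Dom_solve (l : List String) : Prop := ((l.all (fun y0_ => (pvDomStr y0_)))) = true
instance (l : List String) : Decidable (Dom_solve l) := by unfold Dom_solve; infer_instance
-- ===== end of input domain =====

-- B counts the 'a' elements that have an 'a' neighbour instead of running A's counter/reset state machine; return-value equivalence, no mutation involved.

-- ===== PORT A =====
-- state = (count, l1); one fold step per element, final flush after the loop
def pvStepA (s : Int × Int) (i : String) : Int × Int :=
  if i == "a" then (s.1, s.2 + 1)
  else if s.2 > 1 then (s.1 + s.2, 0) else (s.1, 0)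

def solve (l : List String) : Int :=
  let s := l.foldl pvStepA (0, 0)
  if s.2 > 1 then s.1 + s.2 else s.1

-- ===== PORT B =====
-- Source B's generator condition at index i; l[i-1] / l[i+1] are only read behind the
-- bounds guards, so getD is exact there.
def pvPredB (l : List String) (i : Nat) : Bool :=
  (l.getD i "" == "a") &&
    ((decide (0 < i) && (l.getD (i - 1) "" == "a")) ||
     (decide (i + 1 < l.length) && (l.getD (i + 1) "" == "a")))

-- sum(1 for i, x in enumerate(l) if …) = number of indices satisfying the condition
def solve_alt (l : List String) : Int :=
  ((List.range l.length).countP (pvPredB l) : Int)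

-- ===== PRECONDITION & SPEC =====
def Spec_solve (l : List String) (out : Int) : Prop := out = solve_alt l
instance (l : List String) (out : Int) : Decidable (Spec_solve l out) := by unfold Spec_solve; infer_instance

-- ===== CLAIM (what is proved, stated in full; the proofs are below) =====
def Claim_equal_solve : Prop := ∀ (l : List String), Dom_solve l → Spec_solve l (solve l)

-- ===== LEMMAS AND PROOFS =====

-- A's final flush, as a function of the fold state
def pvFin (s : Int × Int) : Int := if s.2 > 1 then s.1 + s.2 else s.1

-- B's predicate generalised: the 'left neighbour is "a"' fact at i = 0 is the flag prevA
def pvPredG (prevA : Bool) (l : List String) (i : Nat) : Bool :=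
  (l.getD i "" == "a") &&
    ((if i = 0 then prevA else (l.getD (i - 1) "" == "a")) ||
     (decide (i + 1 < l.length) && (l.getD (i + 1) "" == "a")))

def pvN (prevA : Bool) (l : List String) : Nat :=
  (List.range l.length).countP (pvPredG prevA l)

-- the pending "a"-run of length k still contributes this much to A's answer
def pvCorr (k : Nat) (l : List String) : Int :=
  if k ≥ 2 then (k : Int) else if k = 1 ∧ l.head? = some "a" then 1 else 0

lemma pvPredB_eq_G (l : List String) (i : Nat) : pvPredB l i = pvPredG false l i := by
  unfold pvPredB pvPredG
  rcases Nat.eq_zero_or_pos i with h | h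
  · subst h; simp
  · simp [Nat.pos_iff_ne_zero.mp h, h]

lemma pvPredG_succ (prevA : Bool) (x : String) (xs : List String) (i : Nat) :
    pvPredG prevA (x :: xs) (i + 1) = pvPredG (x == "a") xs i := by
  unfold pvPredG
  rcases Nat.eq_zero_or_pos i with h | h
  · subst h
    have hd : decide (2 ≤ xs.length) = decide (1 < xs.length) := by
      rw [decide_eq_decide]; omega
    simp [hd]
  · have h1 : i + 1 - 1 = (i - 1) + 1 := by omega
    simp [Nat.pos_iff_ne_zero.mp h, h1]

lemma pvN_cons (prevA : Bool) (x : String) (xs : List String) :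
    pvN prevA (x :: xs) =
      (if pvPredG prevA (x :: xs) 0 = true then 1 else 0) + pvN (x == "a") xs := by
  unfold pvN
  rw [show (x :: xs).length = xs.length + 1 from rfl, List.range_succ_eq_map]
  rw [List.countP_cons, List.countP_map]
  have : ∀ i ∈ List.range xs.length,
      (pvPredG prevA (x :: xs) ∘ Nat.succ) i = true ↔ pvPredG (x == "a") xs i = true := by
    intro i _
    simp only [Function.comp_apply, Nat.succ_eq_add_one, pvPredG_succ]
  rw [List.countP_congr this]
  omega

lemma pvStepA_split (c l1 : Int) (i : String) :
    pvStepA (c, l1) i = (c + (pvStepA (0, l1) i).1, (pvStepA (0, l1) i).2) := by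
  simp only [pvStepA]
  split_ifs <;> simp

-- the accumulated count is additive through the fold
lemma pvFin_add (l : List String) : ∀ (c l1 : Int),
    pvFin (l.foldl pvStepA (c, l1)) = c + pvFin (l.foldl pvStepA (0, l1)) := by
  induction l with
  | nil => intro c l1; simp [pvFin]; split_ifs <;> ring
  | cons i l ih =>
    intro c l1
    simp only [List.foldl_cons]
    rw [pvStepA_split, ih]
    conv_rhs => rw [show pvStepA (0, l1) i = ((pvStepA (0, l1) i).1, (pvStepA (0, l1) i).2) from rfl, ih]
    ring

-- the main invariant: A's answer from a pending "a"-run of length k equals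
-- the pending run's contribution plus B's neighbour count with the prev-flag k ≥ 1
lemma pvMain (l : List String) : ∀ (k : Nat),
    pvFin (l.foldl pvStepA (0, (k : Int))) = pvCorr k l + (pvN (decide (1 ≤ k)) l : Int) := by
  induction l with
  | nil =>
    intro k
    simp only [List.foldl_nil, pvFin, pvCorr, pvN, List.length_nil, List.range_zero,
      List.countP_nil]
    have : ¬(k = 1 ∧ (List.nil (α := String)).head? = some "a") := by simp
    rw [if_neg this]
    by_cases h : (k : Int) > 1
    · rw [if_pos h, if_pos (show k ≥ 2 by omega)]; omega
    · rw [if_neg h, if_neg (show ¬(k ≥ 2) by omega)]; omega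
  | cons x xs ih =>
    intro k
    rw [pvN_cons]
    by_cases hx : x = "a"
    · subst hx
      have hstep : pvStepA (0, (k : Int)) "a" = (0, ((k + 1 : Nat) : Int)) := by
        simp [pvStepA]
      rw [List.foldl_cons, hstep, ih (k + 1)]
      have hp0 : pvPredG (decide (1 ≤ k)) ("a" :: xs) 0 =
          (decide (1 ≤ k) || (decide (0 < xs.length) && (xs.getD 0 "" == "a"))) := by
        unfold pvPredG; simp
      have hhead : (decide (0 < xs.length) && (xs.getD 0 "" == "a")) = true ↔
          xs.head? = some "a" := by
        cases xs with
        | nil => simp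
        | cons y ys => simp [List.getD]
      rw [hp0]
      have h1k : decide (1 ≤ k + 1) = true := by simp
      rw [h1k]
      unfold pvCorr
      by_cases hk2 : k ≥ 1
      · have : decide (1 ≤ k) = true := by simpa
        rw [this]
        simp only [Bool.true_or]
        have : k + 1 ≥ 2 := by omega
        rw [if_pos this]
        split_ifs <;> push_cast <;> simp_all <;> omega
      · have hk0 : k = 0 := by omega
        subst hk0
        rw [show ("a" == "a") = true from by decide]
        have hor : ((decide (1 ≤ 0) || (decide (0 < xs.length) && (xs.getD 0 "" == "a"))) = true)
            ↔ xs.head? = some "a" := by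
          rw [Bool.or_eq_true]
          constructor
          · rintro (h | h)
            · simp at h
            · exact hhead.mp h
          · exact fun h => Or.inr (hhead.mpr h)
        rw [if_neg (show ¬((1:Nat) ≥ 2) by omega), if_neg (show ¬((0:Nat) ≥ 2) by omega),
          if_neg (show ¬((0:Nat) = 1 ∧ ("a" :: xs).head? = some "a") by simp)]
        by_cases hh : xs.head? = some "a"
        · rw [if_pos (show (1:Nat) = 1 ∧ xs.head? = some "a" from ⟨rfl, hh⟩),
            if_pos (hor.mpr hh)]
          push_cast; ring
        · rw [if_neg (show ¬((1:Nat) = 1 ∧ xs.head? = some "a") by simp [hh]),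
            if_neg (fun h => hh (hor.mp h))]
          push_cast; ring
    · have hxb : (x == "a") = false := by simpa using hx
      have hstep : pvStepA (0, (k : Int)) x =
          ((if k ≥ 2 then (k : Int) else 0), 0) := by
        simp only [pvStepA, hxb, Bool.false_eq_true, if_false]
        split_ifs <;> simp_all <;> omega
      rw [List.foldl_cons, hstep]
      have ih0 := ih 0
      simp only [Nat.cast_zero] at ih0
      rw [pvFin_add, ih0]
      have hp0 : pvPredG (decide (1 ≤ k)) (x :: xs) 0 = false := by
        unfold pvPredG; simp [hxb]
      rw [hp0, hxb]
      have hc0 : pvCorr 0 xs = 0 := by simp [pvCorr]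
      have hcx : pvCorr k (x :: xs) = if k ≥ 2 then (k : Int) else 0 := by
        unfold pvCorr
        rw [if_neg (show ¬(k = 1 ∧ (x :: xs).head? = some "a") by simp [hx])]
      rw [hc0, hcx]
      simp only [Bool.false_eq_true, if_false, Nat.zero_add,
        show (decide (1 ≤ 0) : Bool) = false from by decide]
      split_ifs <;> omega

lemma pvN_false (l : List String) : pvN false l = (List.range l.length).countP (pvPredB l) := by
  unfold pvN
  exact List.countP_congr (fun i _ => by rw [pvPredB_eq_G])

-- ===== VERDICT (by name: the statement is the Claim_ definition above) =====
theorem solve_spec : Claim_equal_solve := by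
  intro l _
  unfold Spec_solve
  have h := pvMain l 0
  simp only [Nat.cast_zero] at h
  have hA : solve l = pvFin (l.foldl pvStepA (0, 0)) := rfl
  rw [hA, h]
  unfold solve_alt
  rw [← pvN_false]
  simp [pvCorr]
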